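-- pv_equiv track=rewrite | github.com/pypi-data/pypi-mirror-400 | packages/rdf-construct/rdf_construct-0.4.0-py3-none-any.whl/rdf_construct/localise/extractor.py | _expand_property
-- ===== SOURCE A (Python) =====
-- def _expand_property(prop: str) -> str:
--     """Expand a CURIE to full URI.
--
--     Args:
--         prop: Property string (CURIE or full URI).
--
--     Returns:
--         Full URI string.
--     """
--     prefixes = {
--         "rdfs:": "http://www.w3.org/2000/01/rdf-schema#",
--         "skos:": "http://www.w3.org/2004/02/skos/core#",
--         "owl:": "http://www.w3.org/2002/07/owl#",
--         "rdf:": "http://www.w3.org/1999/02/22-rdf-syntax-ns#",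
--         "dc:": "http://purl.org/dc/elements/1.1/",
--         "dcterms:": "http://purl.org/dc/terms/",
--     }
--
--     for prefix, namespace in prefixes.items():
--         if prop.startswith(prefix):
--             return namespace + prop[len(prefix) :]
--
--     return prop
-- ===== SOURCE B (Python) =====
-- def _expand_property(prop: str) -> str:
--     """Expand a CURIE to full URI by splitting at the first colon and one dict lookup."""
--     prefixes = {
--         "rdfs:": "http://www.w3.org/2000/01/rdf-schema#",
--         "skos:": "http://www.w3.org/2004/02/skos/core#",
--         "owl:": "http://www.w3.org/2002/07/owl#",
--         "rdf:": "http://www.w3.org/1999/02/22-rdf-syntax-ns#",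
--         "dc:": "http://purl.org/dc/elements/1.1/",
--         "dcterms:": "http://purl.org/dc/terms/",
--     }
--     i = prop.find(":")
--     if i == -1:
--         return prop
--     namespace = prefixes.get(prop[: i + 1])
--     if namespace is None:
--         return prop
--     return namespace + prop[i + 1 :]
-- ===== Notes on version B (the rewrite author's own statement) =====
-- stated objective: idiomatic
-- what changed: B removes the six-way startswith scan loop: it splits prop at the first colon once and does a single direct dict lookup of the reconstructed 'name:' key.
import Mathlib
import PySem

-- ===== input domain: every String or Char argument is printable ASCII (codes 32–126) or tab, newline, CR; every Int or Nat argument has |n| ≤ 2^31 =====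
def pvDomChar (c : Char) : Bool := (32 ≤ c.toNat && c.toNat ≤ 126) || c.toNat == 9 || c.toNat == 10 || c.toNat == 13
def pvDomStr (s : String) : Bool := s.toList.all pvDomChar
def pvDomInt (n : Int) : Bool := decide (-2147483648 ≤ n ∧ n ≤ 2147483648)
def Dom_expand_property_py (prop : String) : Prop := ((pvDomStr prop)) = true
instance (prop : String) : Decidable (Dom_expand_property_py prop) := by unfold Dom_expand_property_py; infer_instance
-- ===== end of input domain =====

-- B replaces A's six-way startswith scan loop by one split at the first colon plus a single dict lookup (idiomatic; same return value everywhere).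

-- the six-entry prefix table, shared by both ports (identical dict literal in both Pythons)
def pvPrefixes : List (List Char × List Char) :=
  [("rdfs:".toList, "http://www.w3.org/2000/01/rdf-schema#".toList),
   ("skos:".toList, "http://www.w3.org/2004/02/skos/core#".toList),
   ("owl:".toList, "http://www.w3.org/2002/07/owl#".toList),
   ("rdf:".toList, "http://www.w3.org/1999/02/22-rdf-syntax-ns#".toList),
   ("dc:".toList, "http://purl.org/dc/elements/1.1/".toList),
   ("dcterms:".toList, "http://purl.org/dc/terms/".toList)]

-- ===== PORT A =====
-- A's 'for prefix, namespace in prefixes.items(): if prop.startswith(prefix): return namespace + prop[len(prefix):]'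
def pvLoopA (prop : String) (cs : List Char) : List (List Char × List Char) → String
  | [] => prop
  | (q, ns) :: rest =>
      if PySem.Chars.startswith cs q then String.ofList (ns ++ cs.drop q.length)
      else pvLoopA prop cs rest

def expand_property_py (prop : String) : String :=
  pvLoopA prop prop.toList pvPrefixes

-- ===== PORT B =====
-- B: i = prop.find(':'); if i == -1 return prop; look up prop[:i+1] in the dict; on a hit return namespace + prop[i+1:]
def expand_property_py_alt (prop : String) : String :=
  let cs := prop.toList
  let i := PySem.Chars.find cs [':']
  if i = -1 then prop
  else
    match (PySem.Dict.ofList pvPrefixes).get? (cs.take (i.toNat + 1)) with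
    | none => prop
    | some ns => String.ofList (ns ++ cs.drop (i.toNat + 1))

-- ===== PRECONDITION & SPEC =====
def Spec_expand_property_py (prop : String) (out : String) : Prop := out = expand_property_py_alt prop
instance (prop : String) (out : String) : Decidable (Spec_expand_property_py prop out) := by unfold Spec_expand_property_py; infer_instance

-- ===== CLAIM (what is proved, stated in full; the proofs are below) =====
def Claim_equal_expand_property_py : Prop := ∀ (prop : String), Dom_expand_property_py prop → Spec_expand_property_py prop (expand_property_py prop)

-- ===== LEMMAS AND PROOFS =====

-- every table key is a colon-free name followed by a single ':'
def pvGoodTbl (tbl : List (List Char × List Char)) : Prop :=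
  ∀ p ∈ tbl, ∃ q0 : List Char, p.1 = q0 ++ [':'] ∧ ':' ∉ q0

lemma pvPrefixes_good : pvGoodTbl pvPrefixes := by
  intro p hp
  simp only [pvPrefixes, List.mem_cons, List.not_mem_nil, or_false] at hp
  rcases hp with h | h | h | h | h | h <;> subst h
  · exact ⟨"rdfs".toList, by decide, by decide⟩
  · exact ⟨"skos".toList, by decide, by decide⟩
  · exact ⟨"owl".toList, by decide, by decide⟩
  · exact ⟨"rdf".toList, by decide, by decide⟩
  · exact ⟨"dc".toList, by decide, by decide⟩
  · exact ⟨"dcterms".toList, by decide, by decide⟩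

-- uniqueness of the split at the first colon
lemma pvSplit_unique (a : List Char) : ∀ (b u v : List Char), ':' ∉ a → ':' ∉ b →
    a ++ ':' :: u = b ++ ':' :: v → a = b ∧ u = v := by
  induction a with
  | nil =>
      intro b u v _ hb h
      cases b with
      | nil => simpa using h
      | cons x xs =>
          simp only [List.nil_append, List.cons_append, List.cons.injEq] at h
          exact absurd (h.1 ▸ List.mem_cons_self) hb
  | cons x xs ih =>
      intro b u v ha hb h
      cases b with
      | nil =>
          simp only [List.cons_append, List.nil_append, List.cons.injEq] at h
          exact absurd (h.1 ▸ List.mem_cons_self) ha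
      | cons y ys =>
          simp only [List.cons_append, List.cons.injEq] at h
          obtain ⟨hxy, h2⟩ := h
          have := ih ys u v (fun hm => ha (List.mem_cons_of_mem _ hm))
            (fun hm => hb (List.mem_cons_of_mem _ hm)) h2
          exact ⟨by rw [hxy, this.1], this.2⟩

-- where Python's find(':') points on a string whose first colon follows pre
lemma pvFind_colon (pre rest : List Char) (hpre : ':' ∉ pre) :
    PySem.Chars.find (pre ++ ':' :: rest) [':'] = (pre.length : Int) := by
  set cs := pre ++ ':' :: rest with hcs
  have hinf : [':'] <:+: cs := ⟨pre, rest, by simp [hcs]⟩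
  have hnn : 0 ≤ PySem.Chars.find cs [':'] := (PySem.Chars.find_nonneg_iff cs [':']).2 hinf
  obtain ⟨hpfx, hmin⟩ := PySem.Chars.find_spec (s := cs) (sub := [':']) hnn
  set k := (PySem.Chars.find cs [':']).toNat with hk
  have hkpre : ¬ k < pre.length := by
    intro hlt
    have hdrop : cs.drop k = pre.drop k ++ ':' :: rest := by
      rw [hcs, List.drop_append_of_le_length (le_of_lt hlt)]
    obtain ⟨t, ht⟩ := hpfx
    rw [hdrop] at ht
    have hpd : pre.drop k = pre[k] :: pre.drop (k + 1) := List.drop_eq_getElem_cons hlt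
    rw [hpd] at ht
    simp only [List.cons_append, List.cons.injEq] at ht
    exact hpre (ht.1 ▸ List.getElem_mem hlt)
  have hprek : ¬ pre.length < k := by
    intro hlt
    exact hmin pre.length hlt ⟨rest, by simp [hcs]⟩
  have hkeq : k = pre.length := by omega
  omega

-- A's scan over a good table agrees with one lookup of pre ++ [':'] when the first colon follows pre
lemma pvLoopA_colon (prop : String) (pre rest : List Char) (hpre : ':' ∉ pre) :
    ∀ (tbl : List (List Char × List Char)), pvGoodTbl tbl →
    pvLoopA prop (pre ++ ':' :: rest) tbl =
      (match (PySem.Dict.mk tbl).get? (pre ++ [':']) with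
       | none => prop
       | some ns => String.ofList (ns ++ rest)) := by
  intro tbl
  induction tbl with
  | nil => intro _; simp [pvLoopA, PySem.Dict.get?]
  | cons p t ih =>
      intro hgood
      obtain ⟨q0, hq, hq0⟩ := hgood p List.mem_cons_self
      obtain ⟨q, ns⟩ := p
      simp only at hq
      subst hq
      have htl : pvGoodTbl t := fun x hx => hgood x (List.mem_cons_of_mem _ hx)
      by_cases heq : pre = q0
      · subst heq
        have hsw : PySem.Chars.startswith (pre ++ ':' :: rest) (pre ++ [':']) = true := by
          rw [PySem.Chars.startswith_iff]
          exact ⟨rest, by simp⟩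
        rw [pvLoopA, hsw, PySem.Dict.get?_mk_cons]
        simp

      · have hsw : PySem.Chars.startswith (pre ++ ':' :: rest) (q0 ++ [':']) = false := by
          rw [Bool.eq_false_iff, Ne, PySem.Chars.startswith_iff]
          rintro ⟨tail, ht⟩
          have : q0 ++ ':' :: tail = pre ++ ':' :: rest := by simpa using ht
          exact heq ((pvSplit_unique q0 pre tail rest hq0 hpre this).1).symm
      
        have hne : ((q0 ++ [':'] : List Char) == (pre ++ [':'])) = false := by
          rw [beq_eq_false_iff_ne]
          intro h
          exact heq (List.append_inj_left' h (by simp)).symm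
        rw [pvLoopA, hsw, PySem.Dict.get?_mk_cons, hne]
        simp only [Bool.false_eq_true, if_false]
        exact ih htl

-- A's scan returns prop unchanged when prop has no colon
lemma pvLoopA_no_colon (prop : String) (cs : List Char) (h : ':' ∉ cs) :
    ∀ (tbl : List (List Char × List Char)), pvGoodTbl tbl → pvLoopA prop cs tbl = prop := by
  intro tbl
  induction tbl with
  | nil => intro _; simp [pvLoopA]
  | cons p t ih =>
      intro hgood
      obtain ⟨q0, hq, _⟩ := hgood p List.mem_cons_self
      obtain ⟨q, ns⟩ := p
      simp only at hq
      subst hq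
      have hsw : PySem.Chars.startswith cs (q0 ++ [':']) = false := by
        rw [Bool.eq_false_iff, Ne, PySem.Chars.startswith_iff]
        rintro ⟨tail, ht⟩
        exact h (ht ▸ (by simp : (':' : Char) ∈ (q0 ++ [':']) ++ tail))
      rw [pvLoopA, hsw]
      simp only [Bool.false_eq_true, if_false]
      exact ih (fun x hx => hgood x (List.mem_cons_of_mem _ hx))

lemma pvFirstColon (cs : List Char) (h : ':' ∈ cs) :
    ∃ pre rest, cs = pre ++ ':' :: rest ∧ ':' ∉ pre := by
  induction cs with
  | nil => cases h
  | cons x xs ih =>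
      by_cases hx : x = ':'
      · exact ⟨[], xs, by rw [hx]; rfl, by simp⟩
      · have hm : ':' ∈ xs := by
          rcases List.mem_cons.1 h with h1 | h1
          · exact absurd h1.symm hx
          · exact h1
        obtain ⟨pre, rest, h1, h2⟩ := ih hm
        exact ⟨x :: pre, rest, by rw [List.cons_append, h1], by simp [h2, Ne.symm hx]⟩

lemma pvOfList_mk : PySem.Dict.ofList pvPrefixes = PySem.Dict.mk pvPrefixes := by decide

-- ===== VERDICT (by name: the statement is the Claim_ definition above) =====
theorem expand_property_py_spec : Claim_equal_expand_property_py := by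
  intro prop _
  unfold Spec_expand_property_py expand_property_py expand_property_py_alt
  by_cases hcol : ':' ∈ prop.toList
  · obtain ⟨pre, rest, hcs, hpre⟩ := pvFirstColon prop.toList hcol
    rw [hcs, pvLoopA_colon prop pre rest hpre pvPrefixes pvPrefixes_good]
    have hf : PySem.Chars.find (pre ++ ':' :: rest) [':'] = (pre.length : Int) :=
      pvFind_colon pre rest hpre
    have htake : (pre ++ ':' :: rest).take (pre.length + 1) = pre ++ [':'] := by
      have h1 : pre ++ ':' :: rest = (pre ++ [':']) ++ rest := by simp
      rw [h1, List.take_left' (by simp)]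
    have hdrop : (pre ++ ':' :: rest).drop (pre.length + 1) = rest := by
      have h1 : pre ++ ':' :: rest = (pre ++ [':']) ++ rest := by simp
      rw [h1, List.drop_left' (by simp)]
    simp only [hf, Int.toNat_natCast, htake, hdrop, pvOfList_mk,
      if_neg (show ¬((pre.length : Int) = -1) by omega)]
  · rw [pvLoopA_no_colon prop prop.toList hcol pvPrefixes pvPrefixes_good]
    have hf : PySem.Chars.find prop.toList [':'] = -1 := by
      rw [PySem.Chars.find_eq_neg_one_iff]
      intro hinf
      obtain ⟨s, t, hst⟩ := hinf
      exact hcol (hst ▸ (by simp : (':' : Char) ∈ s ++ [':'] ++ t))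
    simp [hf]
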